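-- pv_equiv track=rewrite | github.com/nyimbi/Flask-AppBuilder | tmp/utils/type_utils.py | get_sqlalchemy_type_name
-- ===== SOURCE A (Python) =====
-- from typing import Dict, Any, Tuple, Optional, Union, Type
-- from typing import Dict, Optional
--
-- POSTGRESQL_TO_SQLALCHEMY_TYPE_NAMES: Dict[str, str] = {
--     'smallint': 'SmallInteger',
--     'integer': 'Integer',
--     'bigint': 'BigInteger',
--     'decimal': 'Numeric',
--     'numeric': 'Numeric',
--     'real': 'Float',
--     'double precision': 'Float',
--     'money': 'Numeric',
--     'character varying': 'String',
--     'varchar': 'String',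
--     'character': 'String',
--     'char': 'String',
--     'text': 'Text',
--     'citext': 'Text',
--     'bytea': 'LargeBinary',
--     'timestamp': 'DateTime',
--     'timestamp with time zone': 'DateTime',
--     'date': 'Date',
--     'time': 'Time',
--     'time with time zone': 'Time',
--     'interval': 'Interval',
--     'boolean': 'Boolean',
--     'point': 'Geometry',
--     'line': 'Geometry',
--     'lseg': 'Geometry',
--     'box': 'Geometry',
--     'path': 'Geometry',
--     'polygon': 'Geometry',
--     'circle': 'Geometry',
--     'cidr': 'CIDR',
--     'inet': 'INET',
--     'macaddr': 'MACADDR',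
--     'tsvector': 'TSVector',
--     'tsquery': 'TSQuery',
--     'uuid': 'UUID',
--     'xml': 'Text',
--     'json': 'JSON',
--     'jsonb': 'JSONB',
--     'int4range': 'INT4RANGE',
--     'int8range': 'INT8RANGE',
--     'numrange': 'NUMRANGE',
--     'tsrange': 'TSRANGE',
--     'tstzrange': 'TSTZRANGE',
--     'daterange': 'DATERANGE',
--     'hstore': 'HSTORE',
--     'bit': 'BIT',
--     'varbit': 'BIT_VARYING',
-- }
--
-- CUSTOM_TYPE_NAMES: Dict[str, str] = {}
--
-- def get_sqlalchemy_type_name(pg_type: str) -> str: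
--     """
--     Get the corresponding SQLAlchemy type name for a PostgreSQL type.
--
--     Args:
--         pg_type (str): PostgreSQL type name
--
--     Returns:
--         str: Corresponding SQLAlchemy type name
--
--     Raises:
--         ValueError: If no matching SQLAlchemy type is found
--
--     Examples:
--         >>> get_sqlalchemy_type_name('integer')
--         'Integer'
--         >>> get_sqlalchemy_type_name('json')
--         'JSON'
--     """
--     pg_type = pg_type.lower()
--
--     if pg_type in CUSTOM_TYPE_NAMES:
--         return CUSTOM_TYPE_NAMES[pg_type]
--
--     if pg_type.endswith('[]'):
--         element_type = pg_type[:-2]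
--         element_sqlalchemy_type = get_sqlalchemy_type_name(element_type)
--         return f'ARRAY({element_sqlalchemy_type})'
--
--     if pg_type.startswith('enum_'):
--         enum_name = pg_type[5:]
--         return f'Enum({enum_name})'
--
--     if pg_type in POSTGRESQL_TO_SQLALCHEMY_TYPE_NAMES:
--         return POSTGRESQL_TO_SQLALCHEMY_TYPE_NAMES[pg_type]
--
--     raise ValueError(f"No matching SQLAlchemy type found for PostgreSQL type: {pg_type}")
-- ===== SOURCE B (Python) =====
-- # B: iterative index loop counts trailing '[]' pairs, a match/case resolves the base name once,
-- # and string multiplication applies the ARRAY wrappers (different decomposition, same cost).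
-- from typing import Dict
--
-- CUSTOM_TYPE_NAMES: Dict[str, str] = {}
--
--
-- def _table_lookup(base: str) -> str:
--     match base:
--         case 'smallint': return 'SmallInteger'
--         case 'integer': return 'Integer'
--         case 'bigint': return 'BigInteger'
--         case 'decimal': return 'Numeric'
--         case 'numeric': return 'Numeric'
--         case 'real': return 'Float'
--         case 'double precision': return 'Float'
--         case 'money': return 'Numeric'
--         case 'character varying': return 'String'
--         case 'varchar': return 'String'
--         case 'character': return 'String'
--         case 'char': return 'String'
--         case 'text': return 'Text'
--         case 'citext': return 'Text'
--         case 'bytea': return 'LargeBinary'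
--         case 'timestamp': return 'DateTime'
--         case 'timestamp with time zone': return 'DateTime'
--         case 'date': return 'Date'
--         case 'time': return 'Time'
--         case 'time with time zone': return 'Time'
--         case 'interval': return 'Interval'
--         case 'boolean': return 'Boolean'
--         case 'point': return 'Geometry'
--         case 'line': return 'Geometry'
--         case 'lseg': return 'Geometry'
--         case 'box': return 'Geometry'
--         case 'path': return 'Geometry'
--         case 'polygon': return 'Geometry'
--         case 'circle': return 'Geometry'
--         case 'cidr': return 'CIDR'
--         case 'inet': return 'INET'
--         case 'macaddr': return 'MACADDR'
--         case 'tsvector': return 'TSVector'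
--         case 'tsquery': return 'TSQuery'
--         case 'uuid': return 'UUID'
--         case 'xml': return 'Text'
--         case 'json': return 'JSON'
--         case 'jsonb': return 'JSONB'
--         case 'int4range': return 'INT4RANGE'
--         case 'int8range': return 'INT8RANGE'
--         case 'numrange': return 'NUMRANGE'
--         case 'tsrange': return 'TSRANGE'
--         case 'tstzrange': return 'TSTZRANGE'
--         case 'daterange': return 'DATERANGE'
--         case 'hstore': return 'HSTORE'
--         case 'bit': return 'BIT'
--         case 'varbit': return 'BIT_VARYING'
--         case _:
--             raise ValueError(f"No matching SQLAlchemy type found for PostgreSQL type: {base}")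
--
--
-- def get_sqlalchemy_type_name(pg_type: str) -> str:
--     t = pg_type.lower()
--     n = len(t)
--     d = 0
--     while n >= 2 and t[n - 2] == '[' and t[n - 1] == ']':
--         n -= 2
--         d += 1
--     base = t[:n]
--     if base in CUSTOM_TYPE_NAMES:
--         name = CUSTOM_TYPE_NAMES[base]
--     elif base.startswith('enum_'):
--         name = 'Enum(' + base[5:] + ')'
--     else:
--         name = _table_lookup(base)
--     return 'ARRAY(' * d + name + ')' * d
-- ===== Notes on version B (the rewrite author's own statement) =====
-- stated objective: alternative
-- what changed: Replaces A's recursive self-call per trailing bracket pair (re-lowercasing and re-checking every dict at each nesting level) by an iterative index loop that counts the nesting depth, a single match/case resolution of the base name instead of a dict lookup, and string repetition to apply the ARRAY wrappers.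
import Mathlib
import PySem

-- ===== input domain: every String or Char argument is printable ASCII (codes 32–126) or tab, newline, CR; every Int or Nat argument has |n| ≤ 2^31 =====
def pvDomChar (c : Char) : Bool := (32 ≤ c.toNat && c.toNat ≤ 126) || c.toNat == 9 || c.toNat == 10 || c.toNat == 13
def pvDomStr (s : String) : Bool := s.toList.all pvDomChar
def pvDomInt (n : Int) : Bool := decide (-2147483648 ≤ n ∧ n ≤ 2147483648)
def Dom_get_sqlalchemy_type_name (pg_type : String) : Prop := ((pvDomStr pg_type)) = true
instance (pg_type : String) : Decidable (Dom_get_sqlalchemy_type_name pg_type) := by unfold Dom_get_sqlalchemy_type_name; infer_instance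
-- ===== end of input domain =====

-- B replaces A's recursion per array-nesting level by an index loop counting trailing '[]' pairs,
-- a match/case resolving the base name once, and string repetition for the wrappers (different decomposition, same cost).

-- ===== PORT A =====
-- module constants of Source A: the two type-name dicts
def pvCustomTable : PySem.Dict String String := PySem.Dict.ofList []
def pvPgTable : PySem.Dict String String := PySem.Dict.ofList [
  ("smallint", "SmallInteger"), ("integer", "Integer"), ("bigint", "BigInteger"),
  ("decimal", "Numeric"), ("numeric", "Numeric"), ("real", "Float"),
  ("double precision", "Float"), ("money", "Numeric"),
  ("character varying", "String"), ("varchar", "String"), ("character", "String"),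
  ("char", "String"), ("text", "Text"), ("citext", "Text"), ("bytea", "LargeBinary"),
  ("timestamp", "DateTime"), ("timestamp with time zone", "DateTime"),
  ("date", "Date"), ("time", "Time"), ("time with time zone", "Time"),
  ("interval", "Interval"), ("boolean", "Boolean"), ("point", "Geometry"),
  ("line", "Geometry"), ("lseg", "Geometry"), ("box", "Geometry"),
  ("path", "Geometry"), ("polygon", "Geometry"), ("circle", "Geometry"),
  ("cidr", "CIDR"), ("inet", "INET"), ("macaddr", "MACADDR"),
  ("tsvector", "TSVector"), ("tsquery", "TSQuery"), ("uuid", "UUID"),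
  ("xml", "Text"), ("json", "JSON"), ("jsonb", "JSONB"),
  ("int4range", "INT4RANGE"), ("int8range", "INT8RANGE"), ("numrange", "NUMRANGE"),
  ("tsrange", "TSRANGE"), ("tstzrange", "TSTZRANGE"), ("daterange", "DATERANGE"),
  ("hstore", "HSTORE"), ("bit", "BIT"), ("varbit", "BIT_VARYING")]

-- termination helper for A's bracket-peeling recursion (pg_type[:-2] is strictly shorter in that branch)
theorem pvSliceLen {t : List Char} (h : PySem.Chars.endswith t ['[', ']'] = true) :
    (PySem.List.slice t none (some (-2))).length < t.length := by
  have h2 : 2 ≤ t.length := by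
    have hs := (PySem.Chars.endswith_iff t ['[', ']']).mp h
    simpa using hs.length_le
  have e := PySem.List.slice_to_neg_natCast t 2 (by norm_num)
  norm_num at e
  rw [e]
  simp [List.length_take]
  omega

-- A, literally: lowercase, custom-dict lookup, recursive array case, enum case, table lookup.
-- In the branch where Python raises ValueError the port returns "" (those inputs are excluded by Pre_).
def pvGoA (cs : List Char) : String :=
  let t := PySem.Chars.lower cs
  match pvCustomTable.get? (String.ofList t) with
  | some v => v
  | none =>
    if h : PySem.Chars.endswith t ['[', ']'] then
      "ARRAY(" ++ pvGoA (PySem.List.slice t none (some (-2))) ++ ")"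
    else if PySem.Chars.startswith t ['e', 'n', 'u', 'm', '_'] then
      "Enum(" ++ String.ofList (PySem.List.slice t (some 5) none) ++ ")"
    else
      match pvPgTable.get? (String.ofList t) with
      | some v => v
      | none => ""
termination_by cs.length
decreasing_by
  have h1 := pvSliceLen (t := PySem.Chars.lower cs) h
  have h2 : (PySem.Chars.lower cs).length = cs.length := by
    simp [PySem.Chars.lower]
  omega

def get_sqlalchemy_type_name (pg_type : String) : String := pvGoA pg_type.toList

-- ===== PORT B =====
-- Source B's module constant CUSTOM_TYPE_NAMES
def pvCustomTableB : PySem.Dict String String := PySem.Dict.ofList []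

-- Source B's _table_lookup: one match/case over the base name ("" where Source B raises ValueError; excluded by Pre_)
def pvTableLookupB (base : String) : String :=
  match base with
  | "smallint" => "SmallInteger"
  | "integer" => "Integer"
  | "bigint" => "BigInteger"
  | "decimal" => "Numeric"
  | "numeric" => "Numeric"
  | "real" => "Float"
  | "double precision" => "Float"
  | "money" => "Numeric"
  | "character varying" => "String"
  | "varchar" => "String"
  | "character" => "String"
  | "char" => "String"
  | "text" => "Text"
  | "citext" => "Text"
  | "bytea" => "LargeBinary"
  | "timestamp" => "DateTime"
  | "timestamp with time zone" => "DateTime"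
  | "date" => "Date"
  | "time" => "Time"
  | "time with time zone" => "Time"
  | "interval" => "Interval"
  | "boolean" => "Boolean"
  | "point" => "Geometry"
  | "line" => "Geometry"
  | "lseg" => "Geometry"
  | "box" => "Geometry"
  | "path" => "Geometry"
  | "polygon" => "Geometry"
  | "circle" => "Geometry"
  | "cidr" => "CIDR"
  | "inet" => "INET"
  | "macaddr" => "MACADDR"
  | "tsvector" => "TSVector"
  | "tsquery" => "TSQuery"
  | "uuid" => "UUID"
  | "xml" => "Text"
  | "json" => "JSON"
  | "jsonb" => "JSONB"
  | "int4range" => "INT4RANGE"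
  | "int8range" => "INT8RANGE"
  | "numrange" => "NUMRANGE"
  | "tsrange" => "TSRANGE"
  | "tstzrange" => "TSTZRANGE"
  | "daterange" => "DATERANGE"
  | "hstore" => "HSTORE"
  | "bit" => "BIT"
  | "varbit" => "BIT_VARYING"
  | _ => ""

-- Source B's while loop: 'while n >= 2 and t[n-2] == "[" and t[n-1] == "]": n -= 2; d += 1'
def pvPeelB (t : List Char) (n d : Nat) : Nat × Nat :=
  if h : 2 ≤ n ∧ PySem.List.pyGet? t ((n : Int) - 2) = some '['
           ∧ PySem.List.pyGet? t ((n : Int) - 1) = some ']' then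
    pvPeelB t (n - 2) (d + 1)
  else (n, d)
termination_by n
decreasing_by have := h.1; omega

def get_sqlalchemy_type_name_alt (pg_type : String) : String :=
  let t := PySem.Chars.lower pg_type.toList
  let p := pvPeelB t t.length 0
  let base := String.ofList (PySem.List.slice t none (some ((p.1 : Int))))
  let name :=
    if pvCustomTableB.contains base then pvCustomTableB.getD base ""
    else if PySem.Chars.startswith base.toList ['e', 'n', 'u', 'm', '_'] then
      "Enum(" ++ String.ofList (PySem.List.slice base.toList (some 5) none) ++ ")"
    else pvTableLookupB base
  String.join (List.replicate p.2 "ARRAY(") ++ name ++ String.join (List.replicate p.2 ")")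

-- ===== PRECONDITION & SPEC =====
-- helper for Pre_ only: peel bracket pairs from the front of the REVERSED string (= trailing pairs)
def pvStripRev : List Char → List Char
  | ']' :: '[' :: rest => pvStripRev rest
  | r => r

-- the base name: the lowered input with every trailing bracket pair removed
def pvBase (cs : List Char) : List Char := (pvStripRev cs.reverse).reverse

-- Pre_ excludes exactly the inputs on which Python A raises ValueError: those whose
-- lowered base (after peeling trailing bracket pairs) neither carries the enum prefix nor is a known table key.
def Pre_get_sqlalchemy_type_name (pg_type : String) : Prop :=
  PySem.Chars.startswith (pvBase (PySem.Chars.lower pg_type.toList)) ['e', 'n', 'u', 'm', '_'] = true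
  ∨ pvPgTable.contains (String.ofList (pvBase (PySem.Chars.lower pg_type.toList))) = true
instance (pg_type : String) : Decidable (Pre_get_sqlalchemy_type_name pg_type) := by
  unfold Pre_get_sqlalchemy_type_name; infer_instance

def pvWitness_get_sqlalchemy_type_name : String := "enum_color[]"

def Spec_get_sqlalchemy_type_name (pg_type : String) (out : String) : Prop := out = get_sqlalchemy_type_name_alt pg_type
instance (pg_type : String) (out : String) : Decidable (Spec_get_sqlalchemy_type_name pg_type out) := by unfold Spec_get_sqlalchemy_type_name; infer_instance

-- ===== CLAIM (what is proved, stated in full; the proofs are below) =====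
def Claim_equal_get_sqlalchemy_type_name : Prop := ∀ (pg_type : String), Dom_get_sqlalchemy_type_name pg_type → Pre_get_sqlalchemy_type_name pg_type → Spec_get_sqlalchemy_type_name pg_type (get_sqlalchemy_type_name pg_type)

-- ===== LEMMAS AND PROOFS =====

-- proof-layer middle form: strip trailing pairs A-style, resolve, wrap
def pvStrip (cs : List Char) : Nat × List Char :=
  if h : PySem.Chars.endswith cs ['[', ']'] then
    let p := pvStrip (PySem.List.slice cs none (some (-2)))
    (p.1 + 1, p.2)
  else (0, cs)
termination_by cs.length
decreasing_by exact pvSliceLen h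

def pvResolve (b : List Char) : String :=
  match pvCustomTable.get? (String.ofList b) with
  | some v => v
  | none =>
    if PySem.Chars.startswith b ['e', 'n', 'u', 'm', '_'] then
      "Enum(" ++ String.ofList (PySem.List.slice b (some 5) none) ++ ")"
    else
      match pvPgTable.get? (String.ofList b) with
      | some v => v
      | none => ""

def pvWrap : Nat → String → String
  | 0, s => s
  | n + 1, s => "ARRAY(" ++ pvWrap n s ++ ")"

theorem pvLowerChar_le {c : Char} (h : c.toNat ≤ 126) :
    (PySem.Chars.lowerChar c).toNat ≤ 126 := by
  simp only [PySem.Chars.lowerChar, PySem.Chars.isupper]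
  split_ifs with h1
  · obtain ⟨ha, hb⟩ := Bool.and_eq_true_iff.mp h1
    have hv : Nat.isValidChar (c.toNat + 32) := by left; omega
    have ht : (Char.ofNat (c.toNat + 32)).toNat = c.toNat + 32 := by
      rw [Char.toNat_ofNat]; simp [hv]
    simp only [decide_eq_true_iff, Char.le_def, UInt32.le_iff_toNat_le] at ha hb
    have hZ : ('Z' : Char).val.toNat = 90 := by decide
    simp only [Char.toNat] at ht h ⊢
    omega
  · exact h

theorem pvLowerChar_idem {c : Char} (h : c.toNat ≤ 126) :
    PySem.Chars.lowerChar (PySem.Chars.lowerChar c) = PySem.Chars.lowerChar c := by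
  simp only [PySem.Chars.lowerChar, PySem.Chars.isupper]
  split_ifs with h1 h2 <;> try rfl
  exfalso
  obtain ⟨ha, hb⟩ := Bool.and_eq_true_iff.mp h1
  obtain ⟨ha2, hb2⟩ := Bool.and_eq_true_iff.mp h2
  have hv : Nat.isValidChar (c.toNat + 32) := by left; omega
  have ht : (Char.ofNat (c.toNat + 32)).toNat = c.toNat + 32 := by
    rw [Char.toNat_ofNat]; simp [hv]
  simp only [decide_eq_true_iff, Char.le_def, UInt32.le_iff_toNat_le] at ha hb hb2
  have hA : ('A' : Char).val.toNat = 65 := by decide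
  have hZ : ('Z' : Char).val.toNat = 90 := by decide
  simp only [Char.toNat] at ha hb hb2 ht h
  omega

theorem pvLower_idem {cs : List Char} (h : cs.all (fun c => decide (c.toNat ≤ 126)) = true) :
    PySem.Chars.lower (PySem.Chars.lower cs) = PySem.Chars.lower cs := by
  simp only [PySem.Chars.lower, List.map_map]
  apply List.map_congr_left
  intro c hc
  have := List.all_eq_true.mp h c hc
  exact pvLowerChar_idem (of_decide_eq_true this)

theorem pvCustom_none (s : String) : pvCustomTable.get? s = none := by
  simp [pvCustomTable, PySem.Dict.ofList, PySem.Dict.get?, PySem.Dict.empty, PySem.Dict.update]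

theorem pvCustomB_not_contains (s : String) : pvCustomTableB.contains s = false := by
  simp [pvCustomTableB, PySem.Dict.ofList, PySem.Dict.contains, PySem.Dict.empty, PySem.Dict.update]

-- slices and lowercasing commute; used to transport the inductive hypothesis
theorem pvSliceLower (cs : List Char) :
    PySem.List.slice (PySem.Chars.lower cs) none (some (-2))
      = PySem.Chars.lower (PySem.List.slice cs none (some (-2))) := by
  simp [PySem.Chars.lower, PySem.List.slice, List.map_take]

-- A-side characterisation, by strong induction on the length
set_option maxRecDepth 8192 in
theorem pvMain : ∀ cs : List Char, cs.all (fun c => decide (c.toNat ≤ 126)) = true →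
    pvGoA cs = pvWrap (pvStrip (PySem.Chars.lower cs)).1 (pvResolve (pvStrip (PySem.Chars.lower cs)).2) := by
  intro cs
  induction cs using (measure List.length).wf.induction with
  | _ cs ih =>
    intro hall
    rw [pvGoA.eq_def]
    simp only [pvCustom_none]
    by_cases h : PySem.Chars.endswith (PySem.Chars.lower cs) ['[', ']'] = true
    · set a := PySem.List.slice (PySem.Chars.lower cs) none (some (-2)) with ha
      have hmap : a = PySem.Chars.lower (PySem.List.slice cs none (some (-2))) := by
        rw [ha]; exact pvSliceLower cs
      have hsub : ∀ c ∈ PySem.List.slice cs none (some (-2)), c ∈ cs := by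
        intro c hc
        simp only [PySem.List.slice] at hc
        exact List.mem_of_mem_drop (List.mem_of_mem_take hc)
      have hall' : (PySem.List.slice cs none (some (-2))).all
          (fun c => decide (c.toNat ≤ 126)) = true := by
        apply List.all_eq_true.mpr
        intro c hc
        exact List.all_eq_true.mp hall c (hsub c hc)
      have hlt : a.length < cs.length := by
        have h1 := pvSliceLen h
        have h2 : (PySem.Chars.lower cs).length = cs.length := by
          simp [PySem.Chars.lower]
        rw [ha]; omega
      have halla : a.all (fun c => decide (c.toNat ≤ 126)) = true := by
        rw [hmap]
        apply List.all_eq_true.mpr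
        intro c hc
        simp only [PySem.Chars.lower, List.mem_map] at hc
        obtain ⟨c0, hc0, rfl⟩ := hc
        have := of_decide_eq_true (List.all_eq_true.mp hall' c0 hc0)
        exact decide_eq_true (pvLowerChar_le this)
      have hla : PySem.Chars.lower a = a := by
        rw [hmap, pvLower_idem hall']
      have hIH := ih a hlt halla
      rw [hla] at hIH
      rw [pvStrip.eq_def]
      simp only [dif_pos h]
      rw [pvWrap]
      simp only [← ha]
      rw [hIH]
    · have hs : pvStrip (PySem.Chars.lower cs) = (0, PySem.Chars.lower cs) := by
        rw [pvStrip.eq_def, dif_neg h]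
      rw [hs, pvWrap, pvResolve]
      simp only [pvCustom_none]
      rw [dif_neg h]

-- ---- B-side bridges ----

theorem pvJoinApp (l1 l2 : List String) :
    String.join (l1 ++ l2) = String.join l1 ++ String.join l2 := by
  rw [← String.toList_inj]; simp [String.toList_join]

theorem pvJoinCons (c : String) (l : List String) :
    String.join (c :: l) = c ++ String.join l := by
  rw [← String.toList_inj]; simp [String.toList_join]

theorem pvWrapEq : ∀ (d : Nat) (s : String),
    String.join (List.replicate d "ARRAY(") ++ s ++ String.join (List.replicate d ")")
      = pvWrap d s := by
  intro d
  induction d with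
  | zero => intro s; rw [pvWrap, ← String.toList_inj]; simp [String.join]
  | succ d ih =>
    intro s
    have h1 : String.join (List.replicate (d + 1) "ARRAY(")
        = "ARRAY(" ++ String.join (List.replicate d "ARRAY(") := by
      rw [List.replicate_succ, pvJoinCons]
    have h2 : String.join (List.replicate (d + 1) ")")
        = String.join (List.replicate d ")") ++ ")" := by
      rw [List.replicate_succ', pvJoinApp, ← String.toList_inj]
      simp [String.toList_join, String.join]
    rw [h1, h2, pvWrap, ← ih s, ← String.toList_inj]
    simp

set_option maxHeartbeats 1600000 in
set_option maxRecDepth 100000 in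
theorem pvTableEq (s : String) : pvTableLookupB s = (pvPgTable.get? s).getD "" := by
  by_cases h0 : s = "smallint"
  · subst h0; rfl
  by_cases h1 : s = "integer"
  · subst h1; rfl
  by_cases h2 : s = "bigint"
  · subst h2; rfl
  by_cases h3 : s = "decimal"
  · subst h3; rfl
  by_cases h4 : s = "numeric"
  · subst h4; rfl
  by_cases h5 : s = "real"
  · subst h5; rfl
  by_cases h6 : s = "double precision"
  · subst h6; rfl
  by_cases h7 : s = "money"
  · subst h7; rfl
  by_cases h8 : s = "character varying"
  · subst h8; rfl
  by_cases h9 : s = "varchar"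
  · subst h9; rfl
  by_cases h10 : s = "character"
  · subst h10; rfl
  by_cases h11 : s = "char"
  · subst h11; rfl
  by_cases h12 : s = "text"
  · subst h12; rfl
  by_cases h13 : s = "citext"
  · subst h13; rfl
  by_cases h14 : s = "bytea"
  · subst h14; rfl
  by_cases h15 : s = "timestamp"
  · subst h15; rfl
  by_cases h16 : s = "timestamp with time zone"
  · subst h16; rfl
  by_cases h17 : s = "date"
  · subst h17; rfl
  by_cases h18 : s = "time"
  · subst h18; rfl
  by_cases h19 : s = "time with time zone"
  · subst h19; rfl
  by_cases h20 : s = "interval"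
  · subst h20; rfl
  by_cases h21 : s = "boolean"
  · subst h21; rfl
  by_cases h22 : s = "point"
  · subst h22; rfl
  by_cases h23 : s = "line"
  · subst h23; rfl
  by_cases h24 : s = "lseg"
  · subst h24; rfl
  by_cases h25 : s = "box"
  · subst h25; rfl
  by_cases h26 : s = "path"
  · subst h26; rfl
  by_cases h27 : s = "polygon"
  · subst h27; rfl
  by_cases h28 : s = "circle"
  · subst h28; rfl
  by_cases h29 : s = "cidr"
  · subst h29; rfl
  by_cases h30 : s = "inet"
  · subst h30; rfl
  by_cases h31 : s = "macaddr"
  · subst h31; rfl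
  by_cases h32 : s = "tsvector"
  · subst h32; rfl
  by_cases h33 : s = "tsquery"
  · subst h33; rfl
  by_cases h34 : s = "uuid"
  · subst h34; rfl
  by_cases h35 : s = "xml"
  · subst h35; rfl
  by_cases h36 : s = "json"
  · subst h36; rfl
  by_cases h37 : s = "jsonb"
  · subst h37; rfl
  by_cases h38 : s = "int4range"
  · subst h38; rfl
  by_cases h39 : s = "int8range"
  · subst h39; rfl
  by_cases h40 : s = "numrange"
  · subst h40; rfl
  by_cases h41 : s = "tsrange"
  · subst h41; rfl
  by_cases h42 : s = "tstzrange"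
  · subst h42; rfl
  by_cases h43 : s = "daterange"
  · subst h43; rfl
  by_cases h44 : s = "hstore"
  · subst h44; rfl
  by_cases h45 : s = "bit"
  · subst h45; rfl
  by_cases h46 : s = "varbit"
  · subst h46; rfl
  have hfind : List.find? (fun p => p.1 == s)
      ([("smallint", "SmallInteger"), ("integer", "Integer"), ("bigint", "BigInteger"), ("decimal", "Numeric"), ("numeric", "Numeric"), ("real", "Float"), ("double precision", "Float"), ("money", "Numeric"), ("character varying", "String"), ("varchar", "String"), ("character", "String"), ("char", "String"), ("text", "Text"), ("citext", "Text"), ("bytea", "LargeBinary"), ("timestamp", "DateTime"), ("timestamp with time zone", "DateTime"), ("date", "Date"), ("time", "Time"), ("time with time zone", "Time"), ("interval", "Interval"), ("boolean", "Boolean"), ("point", "Geometry"), ("line", "Geometry"), ("lseg", "Geometry"), ("box", "Geometry"), ("path", "Geometry"), ("polygon", "Geometry"), ("circle", "Geometry"), ("cidr", "CIDR"), ("inet", "INET"), ("macaddr", "MACADDR"), ("tsvector", "TSVector"), ("tsquery", "TSQuery"), ("uuid", "UUID"), ("xml", "Text"), ("json", "JSON"), ("jsonb", "JSONB"), ("int4range",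 "INT4RANGE"), ("int8range", "INT8RANGE"), ("numrange", "NUMRANGE"), ("tsrange", "TSRANGE"), ("tstzrange", "TSTZRANGE"), ("daterange", "DATERANGE"), ("hstore", "HSTORE"), ("bit", "BIT"), ("varbit", "BIT_VARYING")] : List (String × String)) = none := by
    rw [List.find?_eq_none]
    intro x hx
    simp only [List.mem_cons, List.not_mem_nil, or_false] at hx
    rcases hx with rfl | rfl | rfl | rfl | rfl | rfl | rfl | rfl | rfl | rfl | rfl | rfl | rfl | rfl | rfl | rfl | rfl | rfl | rfl | rfl | rfl | rfl | rfl | rfl | rfl | rfl | rfl | rfl | rfl | rfl | rfl | rfl | rfl | rfl | rfl | rfl | rfl | rfl | rfl | rfl | rfl | rfl | rfl | rfl | rfl | rfl | rfl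
    · exact fun he => h0 (eq_of_beq he).symm
    · exact fun he => h1 (eq_of_beq he).symm
    · exact fun he => h2 (eq_of_beq he).symm
    · exact fun he => h3 (eq_of_beq he).symm
    · exact fun he => h4 (eq_of_beq he).symm
    · exact fun he => h5 (eq_of_beq he).symm
    · exact fun he => h6 (eq_of_beq he).symm
    · exact fun he => h7 (eq_of_beq he).symm
    · exact fun he => h8 (eq_of_beq he).symm
    · exact fun he => h9 (eq_of_beq he).symm
    · exact fun he => h10 (eq_of_beq he).symm
    · exact fun he => h11 (eq_of_beq he).symm
    · exact fun he => h12 (eq_of_beq he).symm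
    · exact fun he => h13 (eq_of_beq he).symm
    · exact fun he => h14 (eq_of_beq he).symm
    · exact fun he => h15 (eq_of_beq he).symm
    · exact fun he => h16 (eq_of_beq he).symm
    · exact fun he => h17 (eq_of_beq he).symm
    · exact fun he => h18 (eq_of_beq he).symm
    · exact fun he => h19 (eq_of_beq he).symm
    · exact fun he => h20 (eq_of_beq he).symm
    · exact fun he => h21 (eq_of_beq he).symm
    · exact fun he => h22 (eq_of_beq he).symm
    · exact fun he => h23 (eq_of_beq he).symm
    · exact fun he => h24 (eq_of_beq he).symm
    · exact fun he => h25 (eq_of_beq he).symm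
    · exact fun he => h26 (eq_of_beq he).symm
    · exact fun he => h27 (eq_of_beq he).symm
    · exact fun he => h28 (eq_of_beq he).symm
    · exact fun he => h29 (eq_of_beq he).symm
    · exact fun he => h30 (eq_of_beq he).symm
    · exact fun he => h31 (eq_of_beq he).symm
    · exact fun he => h32 (eq_of_beq he).symm
    · exact fun he => h33 (eq_of_beq he).symm
    · exact fun he => h34 (eq_of_beq he).symm
    · exact fun he => h35 (eq_of_beq he).symm
    · exact fun he => h36 (eq_of_beq he).symm
    · exact fun he => h37 (eq_of_beq he).symm
    · exact fun he => h38 (eq_of_beq he).symm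
    · exact fun he => h39 (eq_of_beq he).symm
    · exact fun he => h40 (eq_of_beq he).symm
    · exact fun he => h41 (eq_of_beq he).symm
    · exact fun he => h42 (eq_of_beq he).symm
    · exact fun he => h43 (eq_of_beq he).symm
    · exact fun he => h44 (eq_of_beq he).symm
    · exact fun he => h45 (eq_of_beq he).symm
    · exact fun he => h46 (eq_of_beq he).symm
  have hnone : pvPgTable.get? s = none := by
    simp [pvPgTable, PySem.Dict.ofList, PySem.Dict.update, PySem.Dict.empty,
      PySem.Dict.insert, PySem.Dict.get?, hfind]
  rw [hnone]
  unfold pvTableLookupB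
  split
  all_goals simp_all

-- the loop body only inspects indices below n, so a longer tail is irrelevant
theorem pvPeelTake : ∀ (n : Nat) (t : List Char) (k d : Nat), n ≤ k →
    pvPeelB t n d = pvPeelB (t.take k) n d := by
  intro n
  induction n using Nat.strong_induction_on with
  | _ n ih =>
    intro t k d hnk
    conv_lhs => rw [pvPeelB.eq_def]
    conv_rhs => rw [pvPeelB.eq_def]
    by_cases h2 : 2 ≤ n
    · have c2 : ((n : Int) - 2) = ((n - 2 : Nat) : Int) := by omega
      have c1 : ((n : Int) - 1) = ((n - 1 : Nat) : Int) := by omega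
      have e2 : PySem.List.pyGet? (t.take k) ((n : Int) - 2) = PySem.List.pyGet? t ((n : Int) - 2) := by
        rw [c2, PySem.List.pyGet?_natCast, PySem.List.pyGet?_natCast]
        simp [show n - 2 < k by omega]
      have e1 : PySem.List.pyGet? (t.take k) ((n : Int) - 1) = PySem.List.pyGet? t ((n : Int) - 1) := by
        rw [c1, PySem.List.pyGet?_natCast, PySem.List.pyGet?_natCast]
        simp [show n - 1 < k by omega]
      simp only [e1, e2]
      split_ifs with hc
      · exact ih (n - 2) (by omega) t k (d + 1) (by omega)
      · rfl
    · have hcT : ¬(2 ≤ n ∧ PySem.List.pyGet? t ((n : Int) - 2) = some '['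
          ∧ PySem.List.pyGet? t ((n : Int) - 1) = some ']') := fun hx => h2 hx.1
      have hcK : ¬(2 ≤ n ∧ PySem.List.pyGet? (t.take k) ((n : Int) - 2) = some '['
          ∧ PySem.List.pyGet? (t.take k) ((n : Int) - 1) = some ']') := fun hx => h2 hx.1
      rw [dif_neg hcT, dif_neg hcK]

theorem pvPeelAcc : ∀ (n : Nat) (t : List Char) (d : Nat),
    pvPeelB t n d = ((pvPeelB t n 0).1, (pvPeelB t n 0).2 + d) := by
  intro n
  induction n using Nat.strong_induction_on with
  | _ n ih =>
    intro t d
    rw [pvPeelB.eq_def, pvPeelB.eq_def (d := 0)]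
    split_ifs with hc
    · rw [ih (n - 2) (by omega) t (d + 1), ih (n - 2) (by omega) t 1]
      simp; omega
    · simp

-- the while-loop condition at n = length is exactly 'endswith "[]"'
theorem pvCondIff (t : List Char) :
    (2 ≤ t.length ∧ PySem.List.pyGet? t ((t.length : Int) - 2) = some '['
       ∧ PySem.List.pyGet? t ((t.length : Int) - 1) = some ']')
      ↔ PySem.Chars.endswith t ['[', ']'] = true := by
  rw [PySem.Chars.endswith_iff, List.suffix_iff_eq_drop]
  constructor
  · rintro ⟨hl, h2, h1⟩
    have c2 : ((t.length : Int) - 2) = ((t.length - 2 : Nat) : Int) := by omega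
    have c1 : ((t.length : Int) - 1) = ((t.length - 1 : Nat) : Int) := by omega
    rw [c2, PySem.List.pyGet?_natCast] at h2
    rw [c1, PySem.List.pyGet?_natCast] at h1
    have hdl : (t.drop (t.length - 2)).length = 2 := by simp; omega
    obtain ⟨a, b, hab⟩ := List.length_eq_two.mp hdl
    have ha : (t.drop (t.length - 2))[0]? = t[t.length - 2]? := by
      rw [List.getElem?_drop]; norm_num
    have hb : (t.drop (t.length - 2))[1]? = t[t.length - 1]? := by
      rw [List.getElem?_drop]; congr 1; omega
    rw [hab] at ha hb
    simp at ha hb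
    rw [← ha] at h2
    rw [← hb] at h1
    simp at h2 h1
    simp only [List.length_cons, List.length_nil]
    rw [hab, h2, h1]
  · intro h
    have h' : ['[', ']'] = t.drop (t.length - 2) := by simpa using h
    have hdl : 2 = (t.drop (t.length - 2)).length := by rw [← h']; simp
    simp at hdl
    have hl : 2 ≤ t.length := by omega
    refine ⟨hl, ?_, ?_⟩
    · have c2 : ((t.length : Int) - 2) = ((t.length - 2 : Nat) : Int) := by omega
      rw [c2, PySem.List.pyGet?_natCast]
      have he : t[t.length - 2]? = (t.drop (t.length - 2))[0]? := by
        rw [List.getElem?_drop]; norm_num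
      rw [he, ← h']; rfl
    · have c1 : ((t.length : Int) - 1) = ((t.length - 1 : Nat) : Int) := by omega
      rw [c1, PySem.List.pyGet?_natCast]
      have he : t[t.length - 1]? = (t.drop (t.length - 2))[1]? := by
        rw [List.getElem?_drop]; congr 1; omega
      rw [he, ← h']; rfl

-- pvStrip's remainder is a prefix of its input
theorem pvStripTake : ∀ t : List Char, ∃ m, m ≤ t.length ∧ (pvStrip t).2 = t.take m := by
  intro t
  induction t using (measure List.length).wf.induction with
  | _ t ih =>
    rw [pvStrip.eq_def]
    split_ifs with h
    · have hl2 : 2 ≤ t.length := by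
        have hs := (PySem.Chars.endswith_iff t ['[', ']']).mp h
        simpa using hs.length_le
      have he : PySem.List.slice t none (some (-2)) = t.take (t.length - 2) := by
        have e := PySem.List.slice_to_neg_natCast t 2 (by norm_num)
        norm_num at e; exact e
      have hlt : (PySem.List.slice t none (some (-2))).length < t.length := pvSliceLen h
      obtain ⟨m, hm, heq⟩ := ih _ hlt
      have hsl : (PySem.List.slice t none (some (-2))).length = t.length - 2 := by
        rw [he]; simp
      have hm2 : m ≤ t.length - 2 := by omega
      refine ⟨m, by omega, ?_⟩
      rw [heq, he, List.take_take]
      congr 1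
      omega
    · exact ⟨t.length, le_refl _, by simp⟩

-- Source B's loop computes (base length, depth) = pvStrip's (remainder length, depth)
theorem pvPeelEq : ∀ t : List Char,
    pvPeelB t t.length 0 = ((pvStrip t).2.length, (pvStrip t).1) := by
  intro t
  induction t using (measure List.length).wf.induction with
  | _ t ih =>
    by_cases h : PySem.Chars.endswith t ['[', ']'] = true
    · have hc := (pvCondIff t).mpr h
      have hl2 : 2 ≤ t.length := hc.1
      have he : PySem.List.slice t none (some (-2)) = t.take (t.length - 2) := by
        have e := PySem.List.slice_to_neg_natCast t 2 (by norm_num)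
        norm_num at e; exact e
      have hlt : (t.take (t.length - 2)).length < t.length := by simp; omega
      have hlen : (t.take (t.length - 2)).length = t.length - 2 := by simp
      conv_lhs => rw [pvPeelB.eq_def]
      rw [dif_pos hc]
      rw [pvPeelTake (t.length - 2) t (t.length - 2) 1 (le_refl _)]
      rw [pvPeelAcc (t.length - 2) (t.take (t.length - 2)) 1]
      have hih := ih (t.take (t.length - 2)) hlt
      rw [hlen] at hih
      rw [hih]
      have hstr : pvStrip t = ((pvStrip (t.take (t.length - 2))).1 + 1,
          (pvStrip (t.take (t.length - 2))).2) := by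
        conv_lhs => rw [pvStrip.eq_def]
        rw [dif_pos h, he]
      rw [hstr]
    · have hc : ¬ (2 ≤ t.length ∧ PySem.List.pyGet? t ((t.length : Int) - 2) = some '['
          ∧ PySem.List.pyGet? t ((t.length : Int) - 1) = some ']') := fun hx => h ((pvCondIff t).mp hx)
      rw [pvPeelB.eq_def, dif_neg hc, pvStrip.eq_def, dif_neg h]

-- B computes the same strip-resolve-wrap value
theorem pvAltEq (pg_type : String) :
    get_sqlalchemy_type_name_alt pg_type
      = pvWrap (pvStrip (PySem.Chars.lower pg_type.toList)).1
          (pvResolve (pvStrip (PySem.Chars.lower pg_type.toList)).2) := by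
  unfold get_sqlalchemy_type_name_alt
  set t := PySem.Chars.lower pg_type.toList with ht
  simp only [pvPeelEq t]
  obtain ⟨m, hm, heq⟩ := pvStripTake t
  have hlen : (pvStrip t).2.length = m := by rw [heq]; simp; omega
  have hbase : PySem.List.slice t none (some (((pvStrip t).2.length : Nat) : Int)) = (pvStrip t).2 := by
    rw [PySem.List.slice_to_natCast, hlen, heq]
  rw [hbase]
  rw [pvWrapEq]
  congr 1
  rw [pvResolve]
  simp only [pvCustom_none, pvCustomB_not_contains, Bool.false_eq_true, if_false]
  have htl : (String.ofList (pvStrip t).2).toList = (pvStrip t).2 := by simp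
  rw [htl]
  split_ifs with hsw
  · rfl
  · rw [pvTableEq]
    cases pvPgTable.get? (String.ofList (pvStrip t).2) <;> rfl

-- ===== VERDICT (by name: the statement is the Claim_ definition above) =====
theorem get_sqlalchemy_type_name_spec : Claim_equal_get_sqlalchemy_type_name := by
  intro pg_type hdom hpre
  unfold Spec_get_sqlalchemy_type_name get_sqlalchemy_type_name
  rw [pvAltEq]
  apply pvMain
  unfold Dom_get_sqlalchemy_type_name pvDomStr at hdom
  apply List.all_eq_true.mpr
  intro c hc
  have := List.all_eq_true.mp hdom c hc
  simp only [pvDomChar, Bool.or_eq_true, Bool.and_eq_true, decide_eq_true_iff,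
    beq_iff_eq] at this
  simp only [decide_eq_true_iff]
  omega
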